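-- pv_equiv track=rewrite | github.com/MattiKiwi/ultimatevocalremovergui | uvr_cli/runner.py | _stem_pair
-- ===== SOURCE A (Python) =====
-- _STEM_PAIRS = {
--     "Vocals": "Instrumental",
--     "Instrumental": "Vocals",
--     "Other": "No Other",
--     "Bass": "No Bass",
--     "Drums": "No Drums",
--     "Guitar": "No Guitar",
--     "Piano": "No Piano",
--     "Synth": "No Synth",
--     "Strings": "No Strings",
--     "Woodwinds": "No Woodwinds",
--     "Brass": "No Brass",
--     "Wind": "No Wind",
--     "lead_only": "backing_only",
--     "backing_only": "lead_only",
-- }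
--
-- def _stem_pair(name: str) -> str:
--     """Return the complementary stem name."""
--     if name in _STEM_PAIRS:
--         return _STEM_PAIRS[name]
--     for key, value in _STEM_PAIRS.items():
--         if name == value:
--             return key
--     if name.startswith("No "):
--         return name[3:]
--     return f"No {name}"
-- ===== SOURCE B (Python) =====
-- def _stem_pair(name: str) -> str:
--     """Return the complementary stem name."""
--     if name == "Vocals":
--         return "Instrumental"
--     if name == "Instrumental":
--         return "Vocals"
--     if name == "lead_only":
--         return "backing_only"
--     if name == "backing_only":
--         return "lead_only"
--     if name.startswith("No "):
--         return name[3:]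
--     return "No " + name
-- ===== Notes on version B (the rewrite author's own statement) =====
-- stated objective: simpler
-- what changed: B drops the 14-entry table and the reverse value scan entirely: only the four irregular pairs (Vocals/Instrumental, lead_only/backing_only) are special-cased, and everything else is a No-prefix toggle (strip the prefix if present, else prepend it), which reproduces the ten base-stem table rows and the loop's reachable results.
import Mathlib
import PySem

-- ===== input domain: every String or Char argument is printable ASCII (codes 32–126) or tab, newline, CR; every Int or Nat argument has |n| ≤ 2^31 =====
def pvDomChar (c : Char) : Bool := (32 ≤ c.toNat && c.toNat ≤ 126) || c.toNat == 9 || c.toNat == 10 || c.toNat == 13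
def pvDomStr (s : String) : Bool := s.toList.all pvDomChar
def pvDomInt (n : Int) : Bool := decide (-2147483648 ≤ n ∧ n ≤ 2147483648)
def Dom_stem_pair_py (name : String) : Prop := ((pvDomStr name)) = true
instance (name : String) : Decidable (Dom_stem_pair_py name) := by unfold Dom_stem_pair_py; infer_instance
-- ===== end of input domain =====

-- B drops A's 14-entry table and reverse value scan: only the four irregular pairs are
-- special-cased and everything else is a 'No '-prefix toggle (objective: simpler).


-- ===== PORT A =====
-- the module constant _STEM_PAIRS
def stemPairs : PySem.Dict String String := PySem.Dict.ofList
  [("Vocals","Instrumental"),("Instrumental","Vocals"),("Other","No Other"),("Bass","No Bass"),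
   ("Drums","No Drums"),("Guitar","No Guitar"),("Piano","No Piano"),("Synth","No Synth"),
   ("Strings","No Strings"),("Woodwinds","No Woodwinds"),("Brass","No Brass"),("Wind","No Wind"),
   ("lead_only","backing_only"),("backing_only","lead_only")]

-- A's 'for key, value in _STEM_PAIRS.items(): if name == value: return key' loop
def findKeyByValue (items : List (String × String)) (name : String) : Option String :=
  match items with
  | [] => none
  | (k, v) :: rest => if name = v then some k else findKeyByValue rest name

def stem_pair_py (name : String) : String :=
  match PySem.Dict.get? stemPairs name with
  | some v => v
  | none =>
    match findKeyByValue (PySem.Dict.items stemPairs) name with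
    | some k => k
    | none =>
      if PySem.Str.startswith name "No " then PySem.Str.slice name (some 3) none
      else PySem.Str.join "" ["No ", name]

-- ===== PORT B =====
-- no table and no loop: four irregular cases, then a 'No '-prefix toggle
def stem_pair_py_alt (name : String) : String :=
  if name = "Vocals" then "Instrumental"
  else if name = "Instrumental" then "Vocals"
  else if name = "lead_only" then "backing_only"
  else if name = "backing_only" then "lead_only"
  else if PySem.Str.startswith name "No " then PySem.Str.slice name (some 3) none
  else PySem.Str.join "" ["No ", name]

-- ===== PRECONDITION & SPEC =====
def Spec_stem_pair_py (name : String) (out : String) : Prop := out = stem_pair_py_alt name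
instance (name : String) (out : String) : Decidable (Spec_stem_pair_py name out) := by unfold Spec_stem_pair_py; infer_instance

-- ===== CLAIM (what is proved, stated in full; the proofs are below) =====
def Claim_equal_stem_pair_py : Prop := ∀ (name : String), Dom_stem_pair_py name → Spec_stem_pair_py name (stem_pair_py name)

-- ===== LEMMAS AND PROOFS =====

-- the concrete items list of the table
theorem stemPairs_eq : stemPairs = ⟨[("Vocals","Instrumental"),("Instrumental","Vocals"),("Other","No Other"),("Bass","No Bass"),
   ("Drums","No Drums"),("Guitar","No Guitar"),("Piano","No Piano"),("Synth","No Synth"),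
   ("Strings","No Strings"),("Woodwinds","No Woodwinds"),("Brass","No Brass"),("Wind","No Wind"),
   ("lead_only","backing_only"),("backing_only","lead_only")]⟩ := by decide

-- ===== VERDICT (by name: the statement is the Claim_ definition above) =====
theorem stem_pair_py_spec : Claim_equal_stem_pair_py := by
  intro name _
  unfold Spec_stem_pair_py
  -- dispatch the 14 table keys and the 10 'No X' table values by computation
  by_cases k1 : name = "Vocals";        · subst k1; decide
  by_cases k2 : name = "Instrumental";  · subst k2; decide
  by_cases k3 : name = "Other";         · subst k3; decide
  by_cases k4 : name = "Bass";          · subst k4; decide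
  by_cases k5 : name = "Drums";         · subst k5; decide
  by_cases k6 : name = "Guitar";        · subst k6; decide
  by_cases k7 : name = "Piano";         · subst k7; decide
  by_cases k8 : name = "Synth";         · subst k8; decide
  by_cases k9 : name = "Strings";       · subst k9; decide
  by_cases k10 : name = "Woodwinds";    · subst k10; decide
  by_cases k11 : name = "Brass";        · subst k11; decide
  by_cases k12 : name = "Wind";         · subst k12; decide
  by_cases k13 : name = "lead_only";    · subst k13; decide
  by_cases k14 : name = "backing_only"; · subst k14; decide
  by_cases v1 : name = "No Other";      · subst v1; decide
  by_cases v2 : name = "No Bass";       · subst v2; decide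
  by_cases v3 : name = "No Drums";      · subst v3; decide
  by_cases v4 : name = "No Guitar";     · subst v4; decide
  by_cases v5 : name = "No Piano";      · subst v5; decide
  by_cases v6 : name = "No Synth";      · subst v6; decide
  by_cases v7 : name = "No Strings";    · subst v7; decide
  by_cases v8 : name = "No Woodwinds";  · subst v8; decide
  by_cases v9 : name = "No Brass";      · subst v9; decide
  by_cases v10 : name = "No Wind";      · subst v10; decide
  -- name is neither a key nor a value: A's lookup and loop both miss,
  -- B's four comparisons all fail, and both sides take the same prefix-toggle tail
  have e : ∀ s : String, name ≠ s → (s == name) = false :=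
    fun s h => beq_eq_false_iff_ne.mpr (Ne.symm h)
  have hget : PySem.Dict.get? stemPairs name = none := by
    rw [stemPairs_eq]
    simp [PySem.Dict.get?, List.find?, e _ k1, e _ k2, e _ k3, e _ k4, e _ k5, e _ k6,
      e _ k7, e _ k8, e _ k9, e _ k10, e _ k11, e _ k12, e _ k13, e _ k14]
  have hfind : findKeyByValue (PySem.Dict.items stemPairs) name = none := by
    rw [stemPairs_eq]
    simp only [findKeyByValue]
    split_ifs; simp_all
  unfold stem_pair_py stem_pair_py_alt
  rw [hget, hfind]
  simp [k1, k2, k13, k14]
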